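-- pv_equiv track=rewrite | github.com/KennedyMelo/IHS-project | de2i-150-project/app/server.py | generate_final_value
-- ===== SOURCE A (Python) =====
-- def bitmask_to_int(bitmask):
--     is_first = True
--     acumulador = 0
--     for item in bitmask:
--
--         if(not is_first):
--             acumulador = acumulador << 1
--
--         if(item==1):
--             acumulador += 1
--
--         is_first = False
--
--     return acumulador & 0xff
--
-- def concatena_bytes(l):
--
--     #l.reverse()
--
--     #s = ""
--     soma = 0
--
--     for index, item in enumerate(l):
--         soma += (item & 0xff) << (index*8)
--
--         #s += str(item)
--
--     return soma & 0xffffffff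
--
-- def generate_final_value(initial_string_with_value):
--
--     bitmask = {
--         '0': [1,0,0,0,0,0,0],
--         '1': [1,1,1,1,0,0,1],
--         '2': [0,1,0,0,1,0,0],
--         '3': [0,1,1,0,0,0,0],
--         '4': [0,0,1,1,0,0,1],
--         '5': [0,0,1,0,0,1,0],
--         '6': [0,0,0,0,0,1,0],
--         '7': [1,1,1,1,0,0,0],
--         '8': [0,0,0,0,0,0,0],
--         '9': [0,0,1,1,0,0,0],
--     }
--
--
--
--     vector_with_chars = [ char for char in initial_string_with_value]
--     vector_with_chars.reverse()
--     lista_de_bytes = map(bitmask_to_int,[bitmask[item] for item in vector_with_chars])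
--     value = concatena_bytes(lista_de_bytes)
--     return value & 0xffffffff
-- ===== SOURCE B (Python) =====
-- DIGIT = {
--     '0': 0x40, '1': 0x79, '2': 0x24, '3': 0x30, '4': 0x19,
--     '5': 0x12, '6': 0x02, '7': 0x78, '8': 0x00, '9': 0x18,
-- }
--
-- def generate_final_value(initial_string_with_value):
--     soma = 0
--     for ch in initial_string_with_value:
--         soma = (soma << 8) + DIGIT[ch]
--     return soma & 0xffffffff
-- ===== Notes on version B (the rewrite author's own statement) =====
-- stated objective: faster
-- what changed: Replaced reverse + per-char 7-element bitmask folding + enumerate-indexed byte summation by a precomputed char-to-byte table and a single forward shift-accumulate pass over the string.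
import Mathlib
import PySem

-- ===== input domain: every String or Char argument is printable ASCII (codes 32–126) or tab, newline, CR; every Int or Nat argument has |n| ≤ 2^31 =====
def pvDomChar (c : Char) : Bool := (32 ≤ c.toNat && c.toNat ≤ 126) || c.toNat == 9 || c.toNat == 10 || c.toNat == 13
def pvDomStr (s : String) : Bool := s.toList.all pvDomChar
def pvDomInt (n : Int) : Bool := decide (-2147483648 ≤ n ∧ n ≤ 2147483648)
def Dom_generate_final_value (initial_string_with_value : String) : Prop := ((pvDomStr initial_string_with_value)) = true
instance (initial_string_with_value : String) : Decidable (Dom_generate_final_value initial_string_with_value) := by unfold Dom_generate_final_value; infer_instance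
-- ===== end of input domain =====

-- B replaces A's reverse + per-char 7-bit folding + enumerate-indexed byte summation by a
-- precomputed char→byte table and one forward shift-accumulate pass (objective: faster, constant factor).

-- ===== PORT A =====
-- loop with is_first flag over the bitmask; '<< 1' is *2 and '& 0xff' is % 256, exact since acumulador stays ≥ 0
def bitmask_to_int (bitmask : List Int) : Int :=
  (bitmask.foldl (fun (st : Bool × Int) item =>
      let ac := if !st.1 then st.2 * 2 else st.2
      let ac := if item = 1 then ac + 1 else ac
      (false, ac)) (true, 0)).2 % 256

-- '(item & 0xff) << (index*8)' = (item % 256) * 2^(8*index), exact since items here are ≥ 0;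
-- '& 0xffffffff' = % 2^32, exact since soma stays ≥ 0
def concatena_bytes (l : List Int) : Int :=
  ((PySem.List.enumerate l 0).foldl
      (fun soma p => soma + (p.2 % 256) * 2 ^ (p.1 * 8).toNat) 0) % 4294967296

def pvBitmaskDict : PySem.Dict Char (List Int) :=
  PySem.Dict.ofList
    [('0', [1,0,0,0,0,0,0]), ('1', [1,1,1,1,0,0,1]), ('2', [0,1,0,0,1,0,0]),
     ('3', [0,1,1,0,0,0,0]), ('4', [0,0,1,1,0,0,1]), ('5', [0,0,1,0,0,1,0]),
     ('6', [0,0,0,0,0,1,0]), ('7', [1,1,1,1,0,0,0]), ('8', [0,0,0,0,0,0,0]),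
     ('9', [0,0,1,1,0,0,0])]

-- bitmask[item] raises KeyError on non-digits: those inputs are excluded by Pre_; '.getD []' is never taken there
def generate_final_value (initial_string_with_value : String) : Int :=
  let vector_with_chars := initial_string_with_value.toList
  let vector_with_chars := vector_with_chars.reverse
  let lista_de_bytes :=
    (vector_with_chars.map (fun item => (pvBitmaskDict.get? item).getD [])).map bitmask_to_int
  let value := concatena_bytes lista_de_bytes
  value % 4294967296

-- ===== PORT B =====
def pvDigitDict : PySem.Dict Char Int :=
  PySem.Dict.ofList
    [('0', 0x40), ('1', 0x79), ('2', 0x24), ('3', 0x30), ('4', 0x19),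
     ('5', 0x12), ('6', 0x02), ('7', 0x78), ('8', 0x00), ('9', 0x18)]

-- DIGIT[ch] raises KeyError on non-digits (excluded by Pre_); 'soma << 8' is soma*256, '& 0xffffffff' is % 2^32 (soma ≥ 0)
def generate_final_value_alt (initial_string_with_value : String) : Int :=
  (initial_string_with_value.toList.foldl
      (fun soma ch => soma * 256 + (pvDigitDict.get? ch).getD 0) 0) % 4294967296

-- ===== PRECONDITION & SPEC =====
-- Pre_ excludes exactly the strings with a non-digit character, on which both Pythons raise KeyError
def Pre_generate_final_value (initial_string_with_value : String) : Prop :=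
  (initial_string_with_value.toList.all Char.isDigit) = true
instance (initial_string_with_value : String) : Decidable (Pre_generate_final_value initial_string_with_value) := by unfold Pre_generate_final_value; infer_instance
def pvWitness_generate_final_value : String := "1203"

def Spec_generate_final_value (initial_string_with_value : String) (out : Int) : Prop := out = generate_final_value_alt initial_string_with_value
instance (initial_string_with_value : String) (out : Int) : Decidable (Spec_generate_final_value initial_string_with_value out) := by unfold Spec_generate_final_value; infer_instance

-- ===== CLAIM (what is proved, stated in full; the proofs are below) =====
def Claim_equal_generate_final_value : Prop := ∀ (initial_string_with_value : String), Dom_generate_final_value initial_string_with_value → Pre_generate_final_value initial_string_with_value → Spec_generate_final_value initial_string_with_value (generate_final_value initial_string_with_value)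

-- ===== LEMMAS AND PROOFS =====

-- under isDigit, c is one of the ten digit characters
theorem pv_digit_cases (c : Char) (h : c.isDigit = true) :
    c = '0' ∨ c = '1' ∨ c = '2' ∨ c = '3' ∨ c = '4' ∨ c = '5' ∨ c = '6' ∨ c = '7' ∨ c = '8' ∨ c = '9' := by
  have h1 : 48 ≤ c.toNat ∧ c.toNat ≤ 57 := by
    simp only [Char.isDigit, Bool.and_eq_true, decide_eq_true_eq] at h
    exact h
  have hv : c.toNat = 48 ∨ c.toNat = 49 ∨ c.toNat = 50 ∨ c.toNat = 51 ∨ c.toNat = 52 ∨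
      c.toNat = 53 ∨ c.toNat = 54 ∨ c.toNat = 55 ∨ c.toNat = 56 ∨ c.toNat = 57 := by omega
  have key : ∀ d : Char, c.toNat = d.toNat → c = d := by
    intro d hd
    apply Char.ext
    exact UInt32.toNat_inj.mp hd
  rcases hv with h|h|h|h|h|h|h|h|h|h
  · exact Or.inl (key '0' h)
  · exact Or.inr (Or.inl (key '1' h))
  · exact Or.inr (Or.inr (Or.inl (key '2' h)))
  · exact Or.inr (Or.inr (Or.inr (Or.inl (key '3' h))))
  · exact Or.inr (Or.inr (Or.inr (Or.inr (Or.inl (key '4' h)))))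
  · exact Or.inr (Or.inr (Or.inr (Or.inr (Or.inr (Or.inl (key '5' h))))))
  · exact Or.inr (Or.inr (Or.inr (Or.inr (Or.inr (Or.inr (Or.inl (key '6' h)))))))
  · exact Or.inr (Or.inr (Or.inr (Or.inr (Or.inr (Or.inr (Or.inr (Or.inl (key '7' h))))))))
  · exact Or.inr (Or.inr (Or.inr (Or.inr (Or.inr (Or.inr (Or.inr (Or.inr (Or.inl (key '8' h)))))))))
  · exact Or.inr (Or.inr (Or.inr (Or.inr (Or.inr (Or.inr (Or.inr (Or.inr (Or.inr (key '9' h)))))))))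

-- A's byte for a digit char equals B's table value
theorem pv_byte_eq (c : Char) (h : c.isDigit = true) :
    bitmask_to_int ((pvBitmaskDict.get? c).getD []) = (pvDigitDict.get? c).getD 0 := by
  rcases pv_digit_cases c h with h|h|h|h|h|h|h|h|h|h <;> subst h <;> decide

theorem pv_byte_range (l : List Int) : 0 ≤ bitmask_to_int l ∧ bitmask_to_int l < 256 := by
  unfold bitmask_to_int
  constructor
  · exact Int.emod_nonneg _ (by norm_num)
  · exact Int.emod_lt_of_pos _ (by norm_num)

-- the enumerate-indexed summation is Horner evaluation, provided every item is in [0, 256)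
theorem pv_enum_fold (l : List Int) (hl : ∀ x ∈ l, 0 ≤ x ∧ x < 256) : ∀ (s : ℕ) (acc : Int),
    (PySem.List.enumerate l (s : Int)).foldl
        (fun soma p => soma + (p.2 % 256) * 2 ^ (p.1 * 8).toNat) acc
      = acc + 2 ^ (8 * s) * l.foldr (fun x a => x + 256 * a) 0 := by
  induction l with
  | nil => intro s acc; simp [PySem.List.enumerate_nil]
  | cons x t ih =>
    intro s acc
    have hx := hl x (by simp)
    have ht : ∀ y ∈ t, 0 ≤ y ∧ y < 256 := fun y hy => hl y (by simp [hy])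
    rw [PySem.List.enumerate_cons]
    have hcast : ((s : Int) + 1) = ((s + 1 : ℕ) : Int) := by push_cast; ring
    rw [List.foldl_cons, hcast, ih ht (s + 1)]
    have hxmod : x % 256 = x := Int.emod_eq_of_lt hx.1 hx.2
    have htn : ((s : Int) * 8).toNat = 8 * s := by omega
    simp only [hxmod, htn, List.foldr_cons]
    have h2 : (2 : Int) ^ (8 * (s + 1)) = 2 ^ (8 * s) * 256 := by
      rw [show 8 * (s + 1) = 8 * s + 8 by ring, pow_add]; norm_num
    rw [h2]; ring

-- ===== VERDICT (by name: the statement is the Claim_ definition above) =====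
theorem generate_final_value_spec : Claim_equal_generate_final_value := by
  intro s _ hpre
  rw [Pre_generate_final_value, List.all_eq_true] at hpre
  unfold Spec_generate_final_value generate_final_value generate_final_value_alt concatena_bytes
  dsimp only
  set cs := s.toList with hcs
  set b : Char → Int := fun c => (pvDigitDict.get? c).getD 0 with hb
  have hmapeq : (cs.reverse.map (fun item => (pvBitmaskDict.get? item).getD [])).map bitmask_to_int
      = (cs.map b).reverse := by
    rw [List.map_map, ← List.map_reverse]
    apply List.map_congr_left
    intro c hc
    exact pv_byte_eq c (hpre c (List.mem_reverse.mp hc))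
  rw [hmapeq]
  have hrange : ∀ x ∈ (cs.map b).reverse, 0 ≤ x ∧ x < 256 := by
    intro x hx
    rw [List.mem_reverse, List.mem_map] at hx
    obtain ⟨c, hc, rfl⟩ := hx
    have := pv_byte_eq c (hpre c hc)
    simp only [hb, ← this]
    exact pv_byte_range _
  have := pv_enum_fold _ hrange 0 0
  norm_num at this
  rw [this, Int.emod_emod_of_dvd _ (by norm_num)]
  congr 1
  rw [List.foldl_map]
  apply PySem.List.foldl_congr_mem
  intro a c _
  ring
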